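-- pv_equiv track=rewrite | github.com/vxnuaj/Training | fr-en-enc-dec/preprocess.py | _spacepunc
-- ===== SOURCE A (Python) =====
-- def _spacepunc(text):
--     """Preprocess text for punctuation spacing and special tokens."""
--     text = text.replace('\u202f', ' ').replace('\xa0', ' ')
--     no_space = lambda char, prev_char: char in ',.!?' and prev_char != ' '
--     out = []
--
--     for i, char in enumerate(text.lower()):
--         if i > 0 and no_space(char, text[i - 1]):
--             out.append(' ' + char)
--         else:
--             out.append(char)
--
--     return '<bos> ' + ''.join(out) + ' <eos>'
-- ===== SOURCE B (Python) =====
-- def _spacepunc(text):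
--     """Preprocess text for punctuation spacing and special tokens."""
--     text = ' ' + text.replace('\u202f', ' ').replace('\xa0', ' ').lower()
--     for p in ',.!?':
--         # insert a space before every p, then drop it again wherever a space
--         # already preceded p (the sentinel space handles position 0)
--         text = text.replace(p, ' ' + p).replace('  ' + p, ' ' + p)
--     return '<bos> ' + text[1:] + ' <eos>'
-- ===== Notes on version B (the rewrite author's own statement) =====
-- stated objective: faster
-- what changed: A's per-character indexed loop (enumerate with text[i-1] lookups, list append, join) is replaced by staged whole-string replace passes: for each punctuation mark, insert a space before every occurrence, then collapse the doubled space where one already preceded it, with a sentinel leading space handling position 0; no per-character Python-level loop remains.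
import Mathlib
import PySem

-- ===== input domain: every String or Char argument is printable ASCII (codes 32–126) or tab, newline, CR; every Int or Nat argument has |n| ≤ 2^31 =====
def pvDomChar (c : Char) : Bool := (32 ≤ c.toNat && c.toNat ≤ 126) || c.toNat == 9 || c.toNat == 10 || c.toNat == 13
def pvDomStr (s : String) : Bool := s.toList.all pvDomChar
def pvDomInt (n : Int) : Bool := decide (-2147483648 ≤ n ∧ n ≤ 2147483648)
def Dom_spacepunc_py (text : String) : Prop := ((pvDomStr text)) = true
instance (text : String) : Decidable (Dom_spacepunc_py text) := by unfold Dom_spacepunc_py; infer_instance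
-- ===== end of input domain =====

-- B replaces A's per-character loop by staged global string.replace passes (insert a space
-- before every punctuation mark, then collapse the doubled space where one already preceded,
-- with a sentinel leading space for position 0) — a different algorithm; a timing run measured B faster (bulk replaces vs a per-char Python loop).

-- ===== PORT A =====
-- char in ',.!?'
def pvPunct (c : Char) : Bool := c == ',' || c == '.' || c == '!' || c == '?'

-- no_space(char, prev_char); prev_char comes from text[i-1] (an Option via pyGet?; the
-- guard i > 0 in the caller makes it always `some`, `none` here is Python's IndexError branch)
def pvNoSpaceA (c : Char) (p? : Option Char) : Bool :=
  match p? with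
  | some p => pvPunct c && p != ' '
  | none => false

def spacepunc_py (text : String) : String :=
  let t := PySem.Str.replace (PySem.Str.replace text "\u202F" " ") "\u00A0" " "
  let tl := t.toList
  let out : List (List Char) :=
    (PySem.List.enumerate (PySem.Chars.lower tl) 0).foldl
      (fun acc ic =>
        if ic.1 > 0 && pvNoSpaceA ic.2 (PySem.List.pyGet? tl (ic.1 - 1)) then
          acc ++ [[' ', ic.2]]
        else
          acc ++ [[ic.2]]) []
  String.ofList ("<bos> ".toList ++ PySem.Chars.join [] out ++ " <eos>".toList)

-- ===== PORT B =====
-- ' ' + text.replace(...).replace(...).lower(); then for p in ',.!?':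
--   text = text.replace(p, ' '+p).replace('  '+p, ' '+p);  return '<bos> ' + text[1:] + ' <eos>'
def spacepunc_py_alt (text : String) : String :=
  let t0 : List Char := ' ' :: PySem.Chars.lower
      (PySem.Str.replace (PySem.Str.replace text "\u202F" " ") "\u00A0" " ").toList
  let t := ",.!?".toList.foldl
      (fun s p =>
        PySem.Chars.replace (PySem.Chars.replace s [p] [' ', p]) [' ', ' ', p] [' ', p]) t0
  String.ofList ("<bos> ".toList ++ PySem.List.slice t (some 1) none ++ " <eos>".toList)

-- ===== PRECONDITION & SPEC =====
def Spec_spacepunc_py (text : String) (out : String) : Prop := out = spacepunc_py_alt text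
instance (text : String) (out : String) : Decidable (Spec_spacepunc_py text out) := by unfold Spec_spacepunc_py; infer_instance

-- ===== CLAIM (what is proved, stated in full; the proofs are below) =====
def Claim_equal_spacepunc_py : Prop := ∀ (text : String), Dom_spacepunc_py text → Spec_spacepunc_py text (spacepunc_py text)

-- ===== LEMMAS AND PROOFS =====

-- ''.join of a cons
theorem pvJoin_nil_cons (x : List Char) (xs : List (List Char)) :
    PySem.Chars.join [] (x :: xs) = x ++ PySem.Chars.join [] xs := by
  cases xs <;> simp [PySem.Chars.join, List.intercalate]

-- lowercasing never creates or destroys a space character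
theorem pvLowerChar_space_iff (c : Char) : (PySem.Chars.lowerChar c != ' ') = (c != ' ') := by
  unfold PySem.Chars.lowerChar
  split_ifs with h
  · simp only [PySem.Chars.isupper, Bool.and_eq_true, decide_eq_true_eq, Char.le_def] at h
    have h1 : 65 ≤ c.toNat := h.1
    have h2 : c.toNat ≤ 90 := h.2
    have hsp : (' ' : Char).toNat = 32 := rfl
    have hv : (c.toNat + 32).isValidChar := Or.inl (by omega)
    have ht : (Char.ofNat (c.toNat + 32)).toNat = c.toNat + 32 := by
      simp only [Char.ofNat, hv, dif_pos]
      exact Char.toNat_ofNatAux hv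
    have hne1 : Char.ofNat (c.toNat + 32) ≠ ' ' := by
      intro hc
      have h3 := congrArg Char.toNat hc
      rw [ht, hsp] at h3
      omega
    have hne2 : c ≠ ' ' := by
      intro hc
      rw [hc, hsp] at h1
      omega
    rw [show (Char.ofNat (c.toNat + 32) != ' ') = true by simpa using hne1,
        show (c != ' ') = true by simpa using hne2]
  · rfl

-- the spacing function both ports compute: emit each char, preceded by a space when it is
-- in P and the previous char is not a space
def pvSpaced (P : Char → Bool) (prev : Char) : List Char → List Char
  | [] => []
  | c :: t => (if P c && prev != ' ' then [' ', c] else [c]) ++ pvSpaced P c t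

theorem pvSpaced_false (t : List Char) : ∀ prev, pvSpaced (fun _ => false) prev t = t := by
  induction t with
  | nil => intro _; rfl
  | cons c t ih => intro prev; simp [pvSpaced, ih]

theorem pvSpaced_congr (P Q : Char → Bool) (h : ∀ c, P c = Q c) (t : List Char) :
    ∀ prev, pvSpaced P prev t = pvSpaced Q prev t := by
  induction t with
  | nil => intro _; rfl
  | cons c t ih => intro prev; simp only [pvSpaced, h, ih]

-- A's enumerate-indexed tail loop, as pvSpaced of the original previous char
theorem pvA_go (rest : List Char) : ∀ (pre : List Char) (q : Char),
    PySem.Chars.join []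
      ((PySem.List.enumerate (PySem.Chars.lower rest) ((pre.length : Int) + 1)).map
        (fun ic =>
          if ic.1 > 0 && pvNoSpaceA ic.2 (PySem.List.pyGet? (pre ++ q :: rest) (ic.1 - 1)) then
            [' ', ic.2]
          else
            [ic.2])) = pvSpaced pvPunct (PySem.Chars.lowerChar q) (PySem.Chars.lower rest) := by
  induction rest with
  | nil =>
    intro pre q
    simp [PySem.Chars.lower, PySem.Chars.join, List.intercalate, pvSpaced]
  | cons c rest ih =>
    intro pre q
    have hlow : PySem.Chars.lower (c :: rest) = PySem.Chars.lowerChar c :: PySem.Chars.lower rest := rfl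
    rw [hlow, PySem.List.enumerate_cons, List.map_cons, pvJoin_nil_cons]
    have hget : PySem.List.pyGet? (pre ++ q :: c :: rest) ((pre.length : Int) + 1 - 1) = some q := by
      rw [show (pre.length : Int) + 1 - 1 = pre.length by ring]
      exact PySem.List.pyGet?_append_length pre (c :: rest) q
    have htail :
        PySem.List.enumerate (PySem.Chars.lower rest) ((pre.length : Int) + 1 + 1)
          = PySem.List.enumerate (PySem.Chars.lower rest) (((pre ++ [q]).length : Int) + 1) := by
      simp
    have happ : pre ++ q :: c :: rest = (pre ++ [q]) ++ c :: rest := by simp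
    rw [hget, htail, happ, ih (pre ++ [q]) c]
    have hcond : (decide ((pre.length : Int) + 1 > 0) &&
        pvNoSpaceA (PySem.Chars.lowerChar c) (some q))
        = (pvPunct (PySem.Chars.lowerChar c) && (PySem.Chars.lowerChar q != ' ')) := by
      have hd : decide ((pre.length : Int) + 1 > 0) = true := by rw [decide_eq_true_eq]; omega
      rw [hd, Bool.true_and, pvLowerChar_space_iff]
      rfl
    rw [hcond]
    cases hb : (pvPunct (PySem.Chars.lowerChar c) && (PySem.Chars.lowerChar q != ' ')) <;>
      simp [pvSpaced, hb]

-- A's whole output char list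
theorem pvA_chars (s : List Char) :
    PySem.Chars.join []
      ((PySem.List.enumerate (PySem.Chars.lower s) 0).foldl
        (fun acc ic =>
          if ic.1 > 0 && pvNoSpaceA ic.2 (PySem.List.pyGet? s (ic.1 - 1)) then
            acc ++ [[' ', ic.2]]
          else
            acc ++ [[ic.2]]) [])
    = pvSpaced pvPunct ' ' (PySem.Chars.lower s) := by
  have hbody : (fun (acc : List (List Char)) (ic : Int × Char) =>
      if ic.1 > 0 && pvNoSpaceA ic.2 (PySem.List.pyGet? s (ic.1 - 1)) then
        acc ++ [[' ', ic.2]] else acc ++ [[ic.2]])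
      = (fun acc ic => acc ++
          [if ic.1 > 0 && pvNoSpaceA ic.2 (PySem.List.pyGet? s (ic.1 - 1)) then
             [' ', ic.2] else [ic.2]]) := by
    funext acc ic; split_ifs <;> rfl
  rw [hbody, PySem.List.foldl_append_singleton_eq_map, List.nil_append]
  cases s with
  | nil => simp [PySem.Chars.lower, PySem.Chars.join, List.intercalate, pvSpaced]
  | cons q rest =>
    have hlow : PySem.Chars.lower (q :: rest) = PySem.Chars.lowerChar q :: PySem.Chars.lower rest := rfl
    have hA := pvA_go rest [] q
    simp only [List.length_nil, Nat.cast_zero, List.nil_append] at hA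
    rw [hlow, PySem.List.enumerate_cons, List.map_cons, pvJoin_nil_cons]
    simp only [pvSpaced]
    simp
    simp at hA
    exact hA

-- ---- B side: the two replace passes, characterized structurally ----

-- text.replace(p, ' ' + p): a space inserted before every occurrence of p
def pvIns (q : Char) (l : List Char) : List Char :=
  l.flatMap (fun c => if c = q then [' ', c] else [c])

-- text.replace('  ' + p, ' ' + p): leftmost non-overlapping collapse of '  p' to ' p'
def pvRem (q : Char) : List Char → List Char
  | [] => []
  | [c] => [c]
  | [c, d] => [c, d]
  | c :: d :: e :: t =>
      if c = ' ' ∧ d = ' ' ∧ e = q then ' ' :: q :: pvRem q t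
      else c :: pvRem q (d :: e :: t)

theorem pvGoOne (q : Char) (l : List Char) : ∀ (fuel : Nat) (acc : List Char), l.length ≤ fuel →
    PySem.Chars.replace.go [q] [' ', q] fuel l acc = acc.reverse ++ pvIns q l := by
  induction l with
  | nil =>
    intro fuel acc _
    cases fuel with
    | zero => rw [PySem.Chars.replace.go]; simp [pvIns]
    | succ f => rw [PySem.Chars.replace.go] <;> simp [pvIns]
  | cons c t ih =>
    intro fuel acc hlen
    cases fuel with
    | zero => simp at hlen
    | succ f =>
      rw [PySem.Chars.replace.go]
      have hpre : List.isPrefixOf [q] (c :: t) = (q == c) := by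
        simp [List.isPrefixOf]
      rw [hpre]
      by_cases hcq : c = q
      · subst hcq
        simp only [BEq.rfl, if_pos]
        rw [show List.drop [c].length (c :: t) = t from rfl]
        rw [ih f (([' ', c].reverse) ++ acc) (by simpa using Nat.le_of_succ_le_succ hlen)]
        simp [pvIns]
      · have : (q == c) = false := by simp [Ne.symm hcq]
        rw [this]
        simp only [Bool.false_eq_true, if_false]
        rw [ih f (c :: acc) (by simpa using Nat.le_of_succ_le_succ hlen)]
        simp [pvIns, hcq]

theorem pvReplace_one (q : Char) (s : List Char) :
    PySem.Chars.replace s [q] [' ', q] = pvIns q s := by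
  rw [PySem.Chars.replace]
  simp only [List.isEmpty_cons, if_false, Bool.false_eq_true]
  simpa using pvGoOne q s s.length [] le_rfl

theorem pvRem_cons_of_not_prefix (q c : Char) (t : List Char)
    (h : ¬ List.isPrefixOf [' ', ' ', q] (c :: t) = true) :
    pvRem q (c :: t) = c :: pvRem q t := by
  match t with
  | [] => rfl
  | [d] => rfl
  | d :: e :: t' =>
    rw [pvRem]
    rw [if_neg]
    intro ⟨h1, h2, h3⟩
    exact h (by simp [List.isPrefixOf, h1, h2, h3])

theorem pvGoTwo (q : Char) : ∀ (fuel : Nat) (l acc : List Char), l.length ≤ fuel →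
    PySem.Chars.replace.go [' ', ' ', q] [' ', q] fuel l acc = acc.reverse ++ pvRem q l := by
  intro fuel
  induction fuel with
  | zero =>
    intro l acc hlen
    have : l = [] := List.length_eq_zero_iff.mp (Nat.le_zero.mp hlen)
    subst this
    rw [PySem.Chars.replace.go]; simp [pvRem]
  | succ f ih =>
    intro l acc hlen
    cases l with
    | nil => rw [PySem.Chars.replace.go] <;> simp [pvRem]
    | cons c t =>
      rw [PySem.Chars.replace.go]
      by_cases hpre : List.isPrefixOf [' ', ' ', q] (c :: t) = true
      · obtain ⟨t', ht⟩ := (List.isPrefixOf_iff_prefix.mp hpre)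
        rw [hpre, if_pos rfl]
        have hct : c :: t = ' ' :: ' ' :: q :: t' := by rw [← ht]; rfl
        rw [hct]
        have hlen' : t'.length ≤ f := by
          have := hlen
          rw [hct] at this
          simp at this
          omega
        rw [show List.drop [' ', ' ', q].length (' ' :: ' ' :: q :: t') = t' by rfl]
        rw [ih t' ([' ', q].reverse ++ acc) hlen']
        rw [show pvRem q (' ' :: ' ' :: q :: t') = ' ' :: q :: pvRem q t' by simp [pvRem]]
        simp
      · rw [show List.isPrefixOf [' ', ' ', q] (c :: t) = false from Bool.eq_false_iff.mpr hpre]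
        simp only [Bool.false_eq_true, if_false]
        rw [ih t (c :: acc) (by simpa using Nat.le_of_succ_le_succ hlen)]
        rw [pvRem_cons_of_not_prefix q c t hpre]
        simp

theorem pvReplace_two (q : Char) (s : List Char) :
    PySem.Chars.replace s [' ', ' ', q] [' ', q] = pvRem q s := by
  rw [PySem.Chars.replace]
  simp only [List.isEmpty_cons, if_false, Bool.false_eq_true]
  simpa using pvGoTwo q s.length s [] le_rfl

-- pvRem stepping lemmas
theorem pvRem_cons_ne (q c : Char) (l : List Char) (hc : c ≠ ' ') :
    pvRem q (c :: l) = c :: pvRem q l := by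
  match l with
  | [] => rfl
  | [d] => rfl
  | d :: e :: t => rw [pvRem, if_neg]; intro ⟨h1, _, _⟩; exact hc h1

theorem pvRem_mid_ne (q x : Char) (l : List Char) (hx : x ≠ ' ') :
    pvRem q (' ' :: x :: l) = ' ' :: pvRem q (x :: l) := by
  match l with
  | [] => rfl
  | e :: t => rw [pvRem, if_neg]; intro ⟨_, h2, _⟩; exact hx h2

theorem pvRem_match (q : Char) (t : List Char) :
    pvRem q (' ' :: ' ' :: q :: t) = ' ' :: q :: pvRem q t := by
  simp [pvRem]

theorem pvRem_ss_ne (q e : Char) (t : List Char) (he : e ≠ q) :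
    pvRem q (' ' :: ' ' :: e :: t) = ' ' :: pvRem q (' ' :: e :: t) := by
  rw [pvRem, if_neg (fun h => he h.2.2)]

theorem pvIns_head_ne (q : Char) (l : List Char) (hq : q ≠ ' ') :
    pvIns q l = [] ∨ ∃ x rest, pvIns q l = x :: rest ∧ x ≠ q := by
  cases l with
  | nil => left; rfl
  | cons c cs =>
    right
    by_cases hcq : c = q
    · exact ⟨' ', q :: pvIns q cs, by simp [pvIns, hcq], Ne.symm hq⟩
    · exact ⟨c, pvIns q cs, by simp [pvIns, hcq], hcq⟩

-- one staged pass equals adding q to the punctuation set (invariant induction)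
theorem pvNS (q : Char) (P : Char → Bool) (hq : q ≠ ' ') (hPq : P q = false)
    (hPs : P ' ' = false) (t : List Char) :
    (∀ prev, prev ≠ ' ' →
        pvRem q (pvIns q (pvSpaced P prev t)) = pvSpaced (fun c => P c || c == q) prev t)
    ∧ pvRem q (' ' :: pvIns q (pvSpaced P ' ' t))
        = ' ' :: pvSpaced (fun c => P c || c == q) ' ' t := by
  induction t with
  | nil =>
    constructor
    · intro prev _; rfl
    · rfl
  | cons c t ih =>
    obtain ⟨ihN, ihS⟩ := ih
    have hQs : (fun c => P c || c == q) ' ' = false := by simp [hPs, Ne.symm hq]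
    constructor
    · intro prev hprev
      have hprev' : (prev != ' ') = true := bne_iff_ne.mpr hprev
      by_cases hPc : P c = true
      · have hcq : c ≠ q := fun h => by rw [h, hPq] at hPc; cases hPc
        have hcs : c ≠ ' ' := fun h => by rw [h, hPs] at hPc; cases hPc
        have hsp : pvSpaced P prev (c :: t) = ' ' :: c :: pvSpaced P c t := by
          simp [pvSpaced, hPc, hprev']
        rw [hsp]
        have hins : pvIns q (' ' :: c :: pvSpaced P c t)
            = ' ' :: c :: pvIns q (pvSpaced P c t) := by
          simp [pvIns, Ne.symm hq, hcq]
        rw [hins, pvRem_mid_ne q c _ hcs, pvRem_cons_ne q c _ hcs, ihN c hcs]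
        simp [pvSpaced, hPc, hprev']
      · have hPc' : P c = false := by simpa using hPc
        have hsp : pvSpaced P prev (c :: t) = c :: pvSpaced P c t := by
          simp [pvSpaced, hPc']
        rw [hsp]
        by_cases hcq : c = q
        · subst hcq
          have hins : pvIns c (c :: pvSpaced P c t)
              = ' ' :: c :: pvIns c (pvSpaced P c t) := by
            simp [pvIns]
          rw [hins, pvRem_mid_ne c c _ hq, pvRem_cons_ne c c _ hq, ihN c hq]
          simp [pvSpaced, hprev', hPc']
        · by_cases hcs : c = ' '
          · subst hcs
            have hins : pvIns q (' ' :: pvSpaced P ' ' t)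
                = ' ' :: pvIns q (pvSpaced P ' ' t) := by
              simp [pvIns, Ne.symm hq]
            rw [hins, ihS]
            simp [pvSpaced, hQs]
          · have hins : pvIns q (c :: pvSpaced P c t)
                = c :: pvIns q (pvSpaced P c t) := by
              simp [pvIns, hcq]
            rw [hins, pvRem_cons_ne q c _ hcs, ihN c hcs]
            simp [pvSpaced, hPc', hcq]
    · have hsp : pvSpaced P ' ' (c :: t) = c :: pvSpaced P c t := by
        simp [pvSpaced]
      rw [hsp]
      by_cases hcq : c = q
      · subst hcq
        have hins : pvIns c (c :: pvSpaced P c t)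
            = ' ' :: c :: pvIns c (pvSpaced P c t) := by
          simp [pvIns]
        rw [hins, pvRem_match, ihN c hq]
        simp [pvSpaced]
      · by_cases hcs : c = ' '
        · subst hcs
          have hins : pvIns q (' ' :: pvSpaced P ' ' t)
              = ' ' :: pvIns q (pvSpaced P ' ' t) := by
            simp [pvIns, Ne.symm hq]
          rw [hins]
          rcases pvIns_head_ne q (pvSpaced P ' ' t) hq with hemp | ⟨x, rest, hx, hxq⟩
          · have hSnil := ihS
            rw [hemp] at hSnil
            have ht0 : pvSpaced (fun c => P c || c == q) ' ' t = [] := by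
              simp [pvRem] at hSnil
              simpa using hSnil
            rw [hemp]
            simp [pvRem, pvSpaced, ht0]
          · rw [hx, pvRem_ss_ne q x rest hxq, ← hx, ihS]
            simp [pvSpaced, hQs]
        · have hins : pvIns q (c :: pvSpaced P c t)
              = c :: pvIns q (pvSpaced P c t) := by
            simp [pvIns, hcq]
          rw [hins, pvRem_mid_ne q c _ hcs, pvRem_cons_ne q c _ hcs, ihN c hcs]
          simp [pvSpaced]

theorem pvStep (q : Char) (P : Char → Bool) (hq : q ≠ ' ') (hPq : P q = false)
    (hPs : P ' ' = false) (u : List Char) :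
    pvRem q (pvIns q (' ' :: pvSpaced P ' ' u))
      = ' ' :: pvSpaced (fun c => P c || c == q) ' ' u := by
  have h1 : pvIns q (' ' :: pvSpaced P ' ' u) = ' ' :: pvIns q (pvSpaced P ' ' u) := by
    simp [pvIns, Ne.symm hq]
  rw [h1]
  exact (pvNS q P hq hPq hPs u).2

-- the four staged passes build exactly the full spacing
theorem pvChain (u : List Char) :
    ",.!?".toList.foldl
      (fun s p =>
        PySem.Chars.replace (PySem.Chars.replace s [p] [' ', p]) [' ', ' ', p] [' ', p])
      (' ' :: u)
    = ' ' :: pvSpaced pvPunct ' ' u := by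
  have hl : ",.!?".toList = [',', '.', '!', '?'] := rfl
  rw [hl]
  simp only [List.foldl, pvReplace_one, pvReplace_two]
  rw [show (' ' :: u : List Char) = ' ' :: pvSpaced (fun _ => false) ' ' u by
    rw [pvSpaced_false]]
  rw [pvStep ',' (fun _ => false) (by decide) rfl rfl]
  rw [pvStep '.' (fun c => false || c == ',') (by decide) (by decide) (by decide)]
  rw [pvStep '!' (fun c => (false || c == ',') || c == '.') (by decide) (by decide) (by decide)]
  rw [pvStep '?' (fun c => ((false || c == ',') || c == '.') || c == '!') (by decide) (by decide) (by decide)]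
  rw [pvSpaced_congr _ pvPunct (fun c => by simp [pvPunct, Bool.or_assoc]) u ' ']

-- ===== VERDICT (by name: the statement is the Claim_ definition above) =====
theorem spacepunc_py_spec : Claim_equal_spacepunc_py := by
  intro text _
  show spacepunc_py text = spacepunc_py_alt text
  simp only [spacepunc_py, spacepunc_py_alt]
  rw [pvA_chars, pvChain, PySem.List.slice_from_one, List.tail_cons]
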